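-- pv_equiv track=rewrite | github.com/kristi5491/python | data-types-lists-task-3-student-template/tasks/task.py | foo
-- ===== SOURCE A (Python) =====
-- from typing import List
--
-- def foo(nums: List[int]) -> List[int]:
--     new_list = []
--     for num in nums:
--         product = 1
--         for num_index in range(len(nums)):
--             if num_index != nums.index(num):
--                 product *= nums[num_index]
--         new_list.append(product)
--     return new_list
-- ===== SOURCE B (Python) =====
-- def foo(nums):
--     # O(n): prefix/suffix products + first-occurrence index map
--     pre = [1]
--     for v in nums:
--         pre.append(pre[-1] * v)
--     suf = [1]
--     for v in reversed(nums):
--         suf.append(suf[-1] * v)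
--     suf.reverse()
--     first = {}
--     for i, v in enumerate(nums):
--         if v not in first:
--             first[v] = i
--     return [pre[first[v]] * suf[first[v] + 1] for v in nums]
-- ===== Notes on version B (the rewrite author's own statement) =====
-- stated objective: faster
-- what changed: Replaced A's per-element full rescan (list.index plus an inner loop over all indices) by one pass of prefix products, one pass of suffix products and a first-occurrence-index dict, combining pre[j]*suf[j+1] per element.
import Mathlib
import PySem

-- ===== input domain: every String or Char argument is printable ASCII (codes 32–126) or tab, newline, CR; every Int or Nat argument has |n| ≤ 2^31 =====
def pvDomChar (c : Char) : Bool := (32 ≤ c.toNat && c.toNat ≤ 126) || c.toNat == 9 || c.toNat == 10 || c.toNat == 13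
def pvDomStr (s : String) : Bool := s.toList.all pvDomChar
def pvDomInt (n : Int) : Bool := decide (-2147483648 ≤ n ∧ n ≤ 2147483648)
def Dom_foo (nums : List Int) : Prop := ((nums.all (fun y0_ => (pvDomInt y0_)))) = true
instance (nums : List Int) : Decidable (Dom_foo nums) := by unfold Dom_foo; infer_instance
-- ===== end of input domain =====

-- B replaces A's per-element rescan of the whole list by one pass of prefix/suffix
-- products plus a first-occurrence index dict; the return values are identical.

-- ===== PORT A =====
-- literal transliteration of A: for each num, scan all indices, skipping nums.index(num)
-- (nums.index(num) never raises here since num ∈ nums, so .getD 0 is never the default)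
def foo (nums : List Int) : List Int :=
  nums.foldl (fun new_list num =>
    let j : Int := ((PySem.List.index? nums num).getD 0 : Nat)
    let product := (PySem.List.pyRange 0 (nums.length : Int) 1).foldl
      (fun product num_index =>
        if num_index ≠ j then product * PySem.List.pyGetD nums num_index 1 else product) 1
    new_list ++ [product]) []

-- ===== PORT B =====
-- literal transliteration of Source B: prefix products, suffix products, first-index dict
def foo_alt (nums : List Int) : List Int :=
  let pre := nums.foldl (fun acc v => acc ++ [PySem.List.pyGetD acc (-1) 1 * v]) [1]
  let suf := (nums.reverse.foldl (fun acc v => acc ++ [PySem.List.pyGetD acc (-1) 1 * v]) [1]).reverse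
  let first := (PySem.List.enumerate nums 0).foldl
    (fun d p => if d.contains p.2 then d else d.insert p.2 p.1) (PySem.Dict.empty : PySem.Dict Int Int)
  nums.map (fun v =>
    let j := first.getD v 0
    PySem.List.pyGetD pre j 1 * PySem.List.pyGetD suf (j + 1) 1)

-- ===== PRECONDITION & SPEC =====
def Spec_foo (nums : List Int) (out : List Int) : Prop := out = foo_alt nums
instance (nums : List Int) (out : List Int) : Decidable (Spec_foo nums out) := by unfold Spec_foo; infer_instance

-- ===== CLAIM (what is proved, stated in full; the proofs are below) =====
def Claim_equal_foo : Prop := ∀ (nums : List Int), Dom_foo nums → Spec_foo nums (foo nums)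

-- ===== LEMMAS AND PROOFS =====

-- A's inner loop with the `if` is a product over the mapped index range
theorem foldl_if_mul (l : List Int) (P : Int → Prop) [DecidablePred P] (g : Int → Int) (init : Int) :
    l.foldl (fun p k => if P k then p * g k else p) init
      = init * (l.map (fun k => if P k then g k else 1)).prod := by
  induction l generalizing init with
  | nil => simp
  | cons x xs ih =>
    simp only [List.foldl_cons, List.map_cons, List.prod_cons, ih]
    split_ifs <;> ring

-- product over all indices except j = prefix product * suffix product
theorem prod_except (nums : List Int) (j : Nat) (hj : j < nums.length) :
    ((List.range nums.length).map (fun k => if k ≠ j then nums.getD k 1 else 1)).prod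
      = (nums.take j).prod * (nums.drop (j+1)).prod := by
  induction nums generalizing j with
  | nil => simp at hj
  | cons x xs ih =>
    simp only [List.length_cons, List.range_succ_eq_map, List.map_cons, List.map_map,
      List.prod_cons]
    cases j with
    | zero =>
      simp only [ne_eq, not_true_eq_false, if_false, List.take_zero, List.prod_nil, one_mul,
        List.drop_succ_cons, List.drop_zero]
      have h1 : (List.map ((fun k => if ¬k = 0 then (x :: xs).getD k 1 else 1) ∘ Nat.succ)
          (List.range xs.length)) = List.map (fun k => xs.getD k 1) (List.range xs.length) := by
        apply List.map_congr_left; intro k _; simp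
      rw [h1]
      have h2 : List.map (fun k => xs.getD k 1) (List.range xs.length) = xs := by
        apply List.ext_getElem
        · simp
        · intro i h1 h2; simp [List.getD_eq_getElem?_getD, List.getElem?_eq_getElem h2]
      rw [h2]
    | succ j' =>
      have h1 : (List.map ((fun k => if k ≠ j' + 1 then (x :: xs).getD k 1 else 1) ∘ Nat.succ)
          (List.range xs.length)) = List.map (fun k => if k ≠ j' then xs.getD k 1 else 1)
          (List.range xs.length) := by
        apply List.map_congr_left; intro k _
        simp only [Function.comp_apply, ne_eq, Nat.succ_eq_add_one, Nat.add_right_cancel_iff,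
          List.getD_cons_succ]
      rw [h1, ih j' (by simpa using hj)]
      simp only [ne_eq, List.take_succ_cons, List.prod_cons,
        List.drop_succ_cons, List.getD_cons_zero]
      rw [if_pos (by omega : ¬(0 = j' + 1))]; ring

-- the prefix-product build loop produces all take-products
theorem pre_build (l : List Int) (acc : List Int) (a : Int) :
    l.foldl (fun acc v => acc ++ [PySem.List.pyGetD acc (-1) 1 * v]) (acc ++ [a])
      = acc ++ (List.range (l.length+1)).map (fun k => a * (l.take k).prod) := by
  induction l generalizing acc a with
  | nil => simp [List.range_succ]
  | cons x xs ih =>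
    simp only [List.foldl_cons, PySem.List.pyGetD_neg_one_append_singleton]
    rw [ih (acc ++ [a]) (a * x)]
    simp only [List.length_cons, List.range_succ_eq_map, List.map_cons, List.map_map,
      List.take_zero, List.prod_nil, mul_one, List.append_assoc, List.cons_append]
    have htail : List.map ((fun k => a * x * (List.take k xs).prod) ∘ Nat.succ) (List.range xs.length)
        = List.map ((fun k => a * (List.take k (x :: xs)).prod) ∘ Nat.succ ∘ Nat.succ) (List.range xs.length) := by
      apply List.map_congr_left; intro k _
      simp only [Function.comp_apply, List.take_succ_cons, List.prod_cons]
      ring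
    rw [htail]
    congr 1
    simp

-- the reversed suffix build equals the drop-products
theorem suf_build (nums : List Int) :
    ((List.range (nums.length+1)).map (fun k => (nums.reverse.take k).prod)).reverse
      = (List.range (nums.length+1)).map (fun k => (nums.drop k).prod) := by
  apply List.ext_getElem
  · simp
  · intro i h1 h2
    simp only [List.length_map, List.length_range] at h2
    simp only [List.getElem_reverse, List.length_map, List.length_range,
      List.getElem_map, List.getElem_range, List.take_reverse, List.prod_reverse]
    congr 2
    omega

-- the dict-building fold never overwrites an existing entry
theorem first_preserve (l : List (Int × Int)) (d : PySem.Dict Int Int) (v x : Int)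
    (h : d.get? v = some x) :
    (l.foldl (fun d p => if d.contains p.2 then d else d.insert p.2 p.1) d).get? v = some x := by
  induction l generalizing d with
  | nil => simpa
  | cons p l ih =>
    simp only [List.foldl_cons]
    split_ifs with hc
    · exact ih d h
    · apply ih
      by_cases hv : v = p.2
      · subst hv
        rw [PySem.Dict.contains_eq_isSome_get?, h] at hc
        simp at hc
      · rw [PySem.Dict.get?_insert_of_ne _ _ hv, h]

-- the first-occurrence dict maps each member to its first index
theorem first_get (l : List Int) (s : Int) (d : PySem.Dict Int Int) (v : Int)
    (hv : v ∈ l) (hd : d.get? v = none) :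
    ((PySem.List.enumerate l s).foldl (fun d p => if d.contains p.2 then d else d.insert p.2 p.1) d).get? v
      = some (s + (l.idxOf v : Nat)) := by
  induction l generalizing s d with
  | nil => simp at hv
  | cons x xs ih =>
    rw [PySem.List.enumerate_cons]
    simp only [List.foldl_cons]
    by_cases hx : v = x
    · subst hx
      have hc : d.contains v = false := by
        rw [PySem.Dict.contains_eq_isSome_get?, hd]; rfl
      rw [if_neg (by simp [hc])]
      rw [List.idxOf_cons_self]
      simpa using first_preserve _ _ v s (by simp [PySem.Dict.get?_insert_self])
    · have hvx : xs.idxOf v + 1 = (x :: xs).idxOf v := by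
        rw [List.idxOf_cons_ne _ (by exact fun h => hx h.symm)]
      have hmem : v ∈ xs := by cases hv with | head => exact absurd rfl hx | tail _ h => exact h
      split_ifs with hc
      · rw [ih (s+1) d hmem hd, ← hvx]; push_cast; ring_nf
      · rw [ih (s+1) _ hmem (by rw [PySem.Dict.get?_insert_of_ne _ _ hx, hd]), ← hvx]
        push_cast; ring_nf

-- nums.index(num) for num ∈ nums is the first-occurrence index
theorem index_getD (l : List Int) (v : Int) (h : v ∈ l) :
    (PySem.List.index? l v).getD 0 = l.idxOf v := by
  rw [PySem.List.index?_eq_idxOf?]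
  cases hE : l.idxOf? v with
  | none => rw [List.idxOf?_eq_none_iff] at hE; exact absurd h hE
  | some k => rw [List.idxOf_eq_getD_idxOf?, hE]; rfl

-- ===== VERDICT (by name: the statement is the Claim_ definition above) =====
theorem foo_spec : Claim_equal_foo := by
  intro nums _
  unfold Spec_foo
  -- A's outer loop is a map
  have hA : foo nums = nums.map (fun num =>
      (PySem.List.pyRange 0 (nums.length : Int) 1).foldl
        (fun product num_index =>
          if num_index ≠ (((PySem.List.index? nums num).getD 0 : Nat) : Int)
          then product * PySem.List.pyGetD nums num_index 1 else product) 1) := by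
    simp only [foo]
    rw [PySem.List.foldl_append_singleton_eq_map]
    simp
  -- B's three loops, characterised
  have hpre := pre_build nums [] 1
  simp only [List.nil_append, one_mul] at hpre
  have hsuf := pre_build nums.reverse [] 1
  simp only [List.nil_append, one_mul, List.length_reverse] at hsuf
  rw [hA]
  simp only [foo_alt, hpre, hsuf, suf_build]
  apply List.map_congr_left
  intro v hv
  have hjlt : nums.idxOf v < nums.length := List.idxOf_lt_length_of_mem hv
  -- the dict lookup
  have hfirst : ((PySem.List.enumerate nums 0).foldl
      (fun d p => if d.contains p.2 then d else d.insert p.2 p.1)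
      (PySem.Dict.empty : PySem.Dict Int Int)).getD v 0 = ((nums.idxOf v : Nat) : Int) := by
    rw [PySem.Dict.getD_eq_get?_getD,
      first_get nums 0 _ v hv (by simp [PySem.Dict.get?_empty])]
    simp
  rw [index_getD nums v hv, hfirst]
  -- A's element
  rw [foldl_if_mul _ (fun k => k ≠ ((nums.idxOf v : Nat) : Int)) _ 1, one_mul,
    PySem.List.pyRange_zero_nat, List.map_map]
  have hmap : (List.range nums.length).map
      ((fun k => if k ≠ ((nums.idxOf v : Nat) : Int) then PySem.List.pyGetD nums k 1 else 1) ∘ (fun k : Nat => (k : Int)))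
      = (List.range nums.length).map (fun k => if k ≠ nums.idxOf v then nums.getD k 1 else 1) := by
    apply List.map_congr_left; intro k _
    simp only [Function.comp_apply, ne_eq, Nat.cast_inj, PySem.List.pyGetD_natCast]
  rw [hmap, prod_except nums _ hjlt]
  -- B's element
  have hc : ((nums.idxOf v : Nat) : Int) + 1 = (((nums.idxOf v + 1 : Nat)) : Int) := by push_cast; ring
  rw [hc, PySem.List.pyGetD_natCast, PySem.List.pyGetD_natCast,
    PySem.List.getD_map_range _ _ _ _ (by omega),
    PySem.List.getD_map_range _ _ _ _ (by omega)]
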